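-- pv_equiv track=rewrite | github.com/nhulox97/SubnetsCalcultator | main.py | get_network_mask
-- ===== SOURCE A (Python) =====
-- def get_network_mask(bit_weight: int = 1):
--     """
--     Get the network mask based on the bits weight
--     :position bit_weight: int
--     :return network_mask: list
--     """
--     mask_string = ''
--     mask_bits = 32 - bit_weight
--     for bit in range(0, 32, 1):
--         if bit >= mask_bits:
--             mask_string += '0'
--         else:
--             mask_string += '1'
--         if (bit + 1) % 8 == 0 and bit < 31:
--             mask_string += '.'
--
--     # convert binary mask octets to decimal
--     mask_octetos = mask_string.split('.')
--     mask_decimal = ''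
--     position_mask = 0
--     for mask_octeto in mask_octetos:
--         digit_decimal = 0
--         for position, digit_string in enumerate(mask_octeto[::-1]):
--             digit_decimal += int(digit_string) * 2 ** position
--         # concat decimal value to decimal mask
--         mask_decimal += f'{digit_decimal}'
--         if position_mask < 3:
--             mask_decimal += '.'
--         position_mask += 1
--
--     # concat network bits
--     mask_decimal += f'/{mask_bits}'
--
--     return [mask_string, mask_decimal]
-- ===== SOURCE B (Python) =====
-- def get_network_mask(bit_weight: int = 1):
--     """
--     Get the network mask based on the bits weight
--     :position bit_weight: int
--     :return network_mask: list
--     """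
--     mask_bits = 32 - bit_weight
--     bins = []
--     decs = []
--     for o in range(4):
--         ones = max(0, min(8, mask_bits - 8 * o))
--         bins.append('1' * ones + '0' * (8 - ones))
--         decs.append(str(256 - 2 ** (8 - ones)))
--     return ['.'.join(bins), '.'.join(decs) + '/' + str(mask_bits)]
-- ===== Notes on version B (the rewrite author's own statement) =====
-- stated objective: simpler
-- what changed: B drops A's intermediate dotted-binary string and its per-octet re-parse (split, reverse, int-per-digit with powers): it computes each octet's clamped count of one-bits directly in a single loop over the octets, building the binary octet by character repetition and obtaining the decimal value in closed form from that count.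
import Mathlib
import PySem

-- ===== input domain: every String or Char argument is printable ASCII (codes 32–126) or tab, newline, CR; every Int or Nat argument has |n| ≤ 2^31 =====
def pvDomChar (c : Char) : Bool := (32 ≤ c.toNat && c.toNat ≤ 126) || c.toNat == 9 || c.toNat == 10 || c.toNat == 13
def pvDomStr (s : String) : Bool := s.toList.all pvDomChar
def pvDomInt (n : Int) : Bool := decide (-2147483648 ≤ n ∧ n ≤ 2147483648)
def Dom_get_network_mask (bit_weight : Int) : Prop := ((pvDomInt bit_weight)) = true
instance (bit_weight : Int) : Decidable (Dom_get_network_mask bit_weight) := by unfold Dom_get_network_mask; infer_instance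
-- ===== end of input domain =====

-- B drops A's build-a-dotted-binary-string-and-re-parse-it pass: it computes each octet's
-- count of one-bits directly and derives both the binary octet and its decimal value in one
-- loop over the 4 octets (objective: simpler).

-- ===== PORT A =====
-- Python strings are ported as List Char (PySem.Chars side) and wrapped with String.ofList
-- at the end; '+=' on strings is List append, exact on these ASCII characters.
def get_network_mask (bit_weight : Int) : List String :=
  let mask_bits := 32 - bit_weight
  let mask_string := (PySem.List.pyRange 0 32 1).foldl (fun s bit =>
      let s := if bit ≥ mask_bits then s ++ ['0'] else s ++ ['1']
      if PySem.Int.mod (bit + 1) 8 == 0 && bit < 31 then s ++ ['.'] else s) ([] : List Char)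
  let mask_octetos := PySem.Chars.splitOn mask_string ['.']
  let r := mask_octetos.foldl (fun (acc : List Char × Int) mask_octeto =>
      -- mask_octeto[::-1] is reverse; int(digit_string) on a '0'/'1' character is exact,
      -- and position ≥ 0 in enumerate, so 2 ** position is 2 ^ toNat
      let digit_decimal := (PySem.List.enumerate mask_octeto.reverse 0).foldl
          (fun d pd => d + (PySem.Int.ofChars? [pd.2]).getD 0 * 2 ^ pd.1.toNat) 0
      let md := acc.1 ++ PySem.Int.toChars digit_decimal
      let md := if acc.2 < 3 then md ++ ['.'] else md
      (md, acc.2 + 1)) (([] : List Char), 0)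
  let mask_decimal := r.1 ++ ['/'] ++ PySem.Int.toChars mask_bits
  [String.ofList mask_string, String.ofList mask_decimal]

-- ===== PORT B =====
def get_network_mask_alt (bit_weight : Int) : List String :=
  let mask_bits := 32 - bit_weight
  -- one loop over the 4 octets, two list accumulators (bins, decs);
  -- ones ∈ [0,8] by the clamp, so '1' * ones is List.replicate ones.toNat and 8 - ones ≥ 0
  let p := (PySem.List.pyRange 0 4 1).foldl (fun (acc : List (List Char) × List (List Char)) o =>
      let ones := max 0 (min 8 (mask_bits - 8 * o))
      (acc.1 ++ [List.replicate ones.toNat '1' ++ List.replicate (8 - ones).toNat '0'],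
       acc.2 ++ [PySem.Int.toChars (256 - 2 ^ (8 - ones).toNat)])) ([], [])
  [String.ofList (PySem.Chars.join ['.'] p.1),
   String.ofList (PySem.Chars.join ['.'] p.2 ++ ['/'] ++ PySem.Int.toChars mask_bits)]

-- ===== PRECONDITION & SPEC =====
def Spec_get_network_mask (bit_weight : Int) (out : List String) : Prop := out = get_network_mask_alt bit_weight
instance (bit_weight : Int) (out : List String) : Decidable (Spec_get_network_mask bit_weight out) := by unfold Spec_get_network_mask; infer_instance

-- ===== CLAIM (what is proved, stated in full; the proofs are below) =====
def Claim_equal_get_network_mask : Prop := ∀ (bit_weight : Int), Dom_get_network_mask bit_weight → Spec_get_network_mask bit_weight (get_network_mask bit_weight)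

-- ===== LEMMAS AND PROOFS =====

-- for bit_weight > 32 every bit of the mask is 0 on both sides, except the raw /mask_bits suffix
theorem gnm_eq_of_big (bw : Int) (h : 32 < bw) :
    get_network_mask bw = get_network_mask_alt bw := by
  simp only [get_network_mask, get_network_mask_alt]
  rw [PySem.List.foldl_congr_mem _ _
      (fun (s : List Char) bit =>
        if PySem.Int.mod (bit + 1) 8 == 0 && bit < 31 then (s ++ ['0']) ++ ['.'] else s ++ ['0']) _
      (by intro acc x hx
          rw [PySem.List.mem_pyRange_one] at hx
          rw [if_pos (show x ≥ 32 - bw by omega)]),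
    PySem.List.foldl_congr_mem _ _
      (fun (acc : List (List Char) × List (List Char)) o =>
        (acc.1 ++ [List.replicate (0 : Int).toNat '1' ++ List.replicate ((8 : Int) - 0).toNat '0'],
         acc.2 ++ [PySem.Int.toChars (256 - 2 ^ ((8 : Int) - 0).toNat)])) _
      (by intro acc x hx
          rw [PySem.List.mem_pyRange_one] at hx
          rw [show max 0 (min 8 (32 - bw - 8 * x)) = 0 by omega])]
  generalize PySem.Int.toChars (32 - bw) = t
  have h2 : ∀ c1 c2 : List Char, c1 = c2 →
      String.ofList (c1 ++ ['/'] ++ t) = String.ofList (c2 ++ ['/'] ++ t) := by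
    intro c1 c2 hc; rw [hc]
  exact congr_arg₂ (fun a b => [a, b]) (congrArg _ (by decide)) (h2 _ _ (by decide))

-- for bit_weight < 0 every bit of the mask is 1 on both sides, except the raw /mask_bits suffix
theorem gnm_eq_of_small (bw : Int) (h : bw < 0) :
    get_network_mask bw = get_network_mask_alt bw := by
  simp only [get_network_mask, get_network_mask_alt]
  rw [PySem.List.foldl_congr_mem _ _
      (fun (s : List Char) bit =>
        if PySem.Int.mod (bit + 1) 8 == 0 && bit < 31 then (s ++ ['1']) ++ ['.'] else s ++ ['1']) _
      (by intro acc x hx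
          rw [PySem.List.mem_pyRange_one] at hx
          rw [if_neg (show ¬(x ≥ 32 - bw) by omega)]),
    PySem.List.foldl_congr_mem _ _
      (fun (acc : List (List Char) × List (List Char)) o =>
        (acc.1 ++ [List.replicate (8 : Int).toNat '1' ++ List.replicate ((8 : Int) - 8).toNat '0'],
         acc.2 ++ [PySem.Int.toChars (256 - 2 ^ ((8 : Int) - 8).toNat)])) _
      (by intro acc x hx
          rw [PySem.List.mem_pyRange_one] at hx
          rw [show max 0 (min 8 (32 - bw - 8 * x)) = 8 by omega])]
  generalize PySem.Int.toChars (32 - bw) = t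
  have h2 : ∀ c1 c2 : List Char, c1 = c2 →
      String.ofList (c1 ++ ['/'] ++ t) = String.ofList (c2 ++ ['/'] ++ t) := by
    intro c1 c2 hc; rw [hc]
  exact congr_arg₂ (fun a b => [a, b]) (congrArg _ (by decide)) (h2 _ _ (by decide))

-- ===== VERDICT (by name: the statement is the Claim_ definition above) =====
theorem get_network_mask_spec : Claim_equal_get_network_mask := by
  intro bw _
  unfold Spec_get_network_mask
  by_cases h1 : bw < 0
  · exact gnm_eq_of_small bw h1
  · by_cases h2 : 32 < bw
    · exact gnm_eq_of_big bw h2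
    · have hl : 0 ≤ bw := by omega
      have hu : bw ≤ 32 := by omega
      interval_cases bw <;> decide
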